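-- pv_equiv track=rewrite | github.com/enzo-dante/python | challenge_questions/challenge_set_2.py | is_odd_string
-- ===== SOURCE A (Python) =====
-- import string # for alphabet
--
-- def is_odd_string(letters):
--
--     sum = 0
--     n_list = [n for n in range(1, 27)]
--     a_list = list(string.ascii_lowercase)
--
--     # create dictionary of with nums as keys and values as letters in the alphabet via zip
--     d = dict(zip(n_list, a_list))
--
--     for (k, v) in d.items():
--
--         for l in letters:
--
--             if l == v:
--                 sum += k
--
--     if sum % 2 != 0:
--         return True
--
--     return False
-- ===== SOURCE B (Python) =====
-- def is_odd_string(letters):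
--     total = 0
--     for l in letters:
--         if 'a' <= l <= 'z':
--             total += ord(l) - 96
--     return total % 2 != 0
-- ===== Notes on version B (the rewrite author's own statement) =====
-- stated objective: simpler
-- what changed: Replaces the 26-entry number-to-letter dict and the nested scan (26 passes over the input) by a single pass that adds ord(l)-96 for each lowercase letter.
import Mathlib
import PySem

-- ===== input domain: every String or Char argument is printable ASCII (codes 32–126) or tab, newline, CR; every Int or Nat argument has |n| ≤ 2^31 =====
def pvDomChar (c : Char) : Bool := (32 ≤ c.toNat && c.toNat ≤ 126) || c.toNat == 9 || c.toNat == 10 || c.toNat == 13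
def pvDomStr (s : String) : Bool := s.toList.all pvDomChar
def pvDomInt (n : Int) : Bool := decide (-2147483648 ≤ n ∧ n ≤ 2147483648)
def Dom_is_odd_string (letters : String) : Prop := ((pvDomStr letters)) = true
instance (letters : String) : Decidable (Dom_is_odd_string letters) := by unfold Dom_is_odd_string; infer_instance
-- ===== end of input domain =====

-- B replaces A's 26-entry dict and nested scan by one pass adding ord(l)-96 per lowercase letter (simpler).

-- ===== PORT A =====
-- dict(zip(n_list, a_list)): keys 1..26 are distinct, so .items() is exactly the zipped pairs in order.
def is_odd_string (letters : String) : Bool :=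
  let n_list := PySem.List.pyRange 1 27 1
  let a_list := "abcdefghijklmnopqrstuvwxyz".toList
  let d := n_list.zip a_list
  let sum := d.foldl (fun s kv =>
    letters.toList.foldl (fun s l => if l = kv.2 then s + kv.1 else s) s) 0
  if PySem.Int.mod sum 2 ≠ 0 then true else false

-- ===== PORT B =====
def is_odd_string_alt (letters : String) : Bool :=
  let total := letters.toList.foldl
    (fun t l => if 'a' ≤ l ∧ l ≤ 'z' then t + ((l.toNat : Int) - 96) else t) 0
  decide (PySem.Int.mod total 2 ≠ 0)

-- ===== PRECONDITION & SPEC =====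
def Spec_is_odd_string (letters : String) (out : Bool) : Prop := out = is_odd_string_alt letters
instance (letters : String) (out : Bool) : Decidable (Spec_is_odd_string letters out) := by unfold Spec_is_odd_string; infer_instance

-- ===== CLAIM (what is proved, stated in full; the proofs are below) =====
def Claim_equal_is_odd_string : Prop := ∀ (letters : String), Dom_is_odd_string letters → Spec_is_odd_string letters (is_odd_string letters)

-- ===== LEMMAS AND PROOFS =====

-- the literal pair list A's dict amounts to
lemma pv_zip_eq : (PySem.List.pyRange 1 27 1).zip "abcdefghijklmnopqrstuvwxyz".toList =
  [(1,'a'),(2,'b'),(3,'c'),(4,'d'),(5,'e'),(6,'f'),(7,'g'),(8,'h'),(9,'i'),(10,'j'),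
   (11,'k'),(12,'l'),(13,'m'),(14,'n'),(15,'o'),(16,'p'),(17,'q'),(18,'r'),(19,'s'),(20,'t'),
   (21,'u'),(22,'v'),(23,'w'),(24,'x'),(25,'y'),(26,'z')] := by decide

lemma pv_char_eq_iff (c d : Char) : c = d ↔ c.toNat = d.toNat := by
  constructor
  · intro h; rw [h]
  · intro h; exact Char.ext (UInt32.toNat_inj.mp h)

lemma pv_char_le_iff (c d : Char) : c ≤ d ↔ c.toNat ≤ d.toNat := by
  rw [Char.le_def, UInt32.le_iff_toNat_le]; rfl

-- inner loop of A: adds k per occurrence of v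
lemma pv_inner (cs : List Char) (k : Int) (v : Char) :
    ∀ s : Int, cs.foldl (fun s l => if l = v then s + k else s) s
      = s + k * ((cs.countP (fun l => l = v)) : Int) := by
  induction cs with
  | nil => intro s; simp
  | cons c cs ih =>
    intro s
    by_cases hc : c = v <;> simp [hc, ih] <;> try ring

-- the value B adds per char
def pvVal (c : Char) : Int := if 'a' ≤ c ∧ c ≤ 'z' then ((c.toNat : Int) - 96) else 0

-- per-char: summing k over the 26 alphabet pairs where the letter matches c gives pvVal c
lemma pv_perchar (c : Char) (hc : pvDomChar c = true) :
    (((PySem.List.pyRange 1 27 1).zip "abcdefghijklmnopqrstuvwxyz".toList).map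
      (fun kv => kv.1 * (if c = kv.2 then (1:Int) else 0))).sum = pvVal c := by
  rw [pv_zip_eq]
  simp only [List.map_cons, List.map_nil, List.sum_cons, List.sum_nil, pvVal]
  simp only [pv_char_eq_iff, pv_char_le_iff]
  have hb : 9 ≤ c.toNat ∧ c.toNat ≤ 126 := by
    simp [pvDomChar] at hc; omega
  generalize c.toNat = n at *
  obtain ⟨h1, h2⟩ := hb
  interval_cases n <;> decide

-- summing k * (count of kv.2 in cs) over the 26 pairs equals summing pvVal over cs
lemma pv_count_sum (cs : List Char) (h : cs.all pvDomChar = true) :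
    (((PySem.List.pyRange 1 27 1).zip "abcdefghijklmnopqrstuvwxyz".toList).map
      (fun kv => kv.1 * ((cs.countP (fun l => l = kv.2)) : Int))).sum
    = (cs.map pvVal).sum := by
  induction cs with
  | nil => rw [pv_zip_eq]; decide
  | cons c cs ih =>
    simp only [List.all_cons, Bool.and_eq_true] at h
    simp only [List.countP_cons, List.map_cons, List.sum_cons]
    have step : (((PySem.List.pyRange 1 27 1).zip "abcdefghijklmnopqrstuvwxyz".toList).map
        (fun kv => kv.1 * (((cs.countP (fun l => l = kv.2) + if decide (c = kv.2) then 1 else 0) : Nat) : Int))).sum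
      = (((PySem.List.pyRange 1 27 1).zip "abcdefghijklmnopqrstuvwxyz".toList).map
        (fun kv => kv.1 * ((cs.countP (fun l => l = kv.2)) : Int))).sum
        + (((PySem.List.pyRange 1 27 1).zip "abcdefghijklmnopqrstuvwxyz".toList).map
        (fun kv => kv.1 * (if c = kv.2 then (1:Int) else 0))).sum := by
      rw [← PySem.List.sum_map_add_int]
      congr 1
      refine List.map_congr_left fun kv _ => ?_
      by_cases hcv : c = kv.2 <;> simp [hcv] <;> try ring
    rw [step, ih h.2, pv_perchar c h.1]
    ring

-- the sum A computes equals (cs.map pvVal).sum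
lemma pv_sum_eq (cs : List Char) (h : cs.all pvDomChar = true) :
    (((PySem.List.pyRange 1 27 1).zip "abcdefghijklmnopqrstuvwxyz".toList).foldl
      (fun s kv => cs.foldl (fun s l => if l = kv.2 then s + kv.1 else s) s) 0)
    = (cs.map pvVal).sum := by
  have gen : ∀ (P : List (Int × Char)) (s : Int),
      P.foldl (fun s kv => cs.foldl (fun s l => if l = kv.2 then s + kv.1 else s) s) s
      = P.foldl (fun s kv => s + kv.1 * ((cs.countP (fun l => l = kv.2)) : Int)) s := by
    intro P
    induction P with
    | nil => intro _; rfl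
    | cons kv P ih =>
      intro s
      rw [List.foldl_cons, List.foldl_cons, ih, pv_inner cs kv.1 kv.2 s]
  rw [gen, PySem.List.foldl_add, pv_count_sum cs h]
  ring

-- B's loop computes (cs.map pvVal).sum
lemma pv_alt_sum (cs : List Char) :
    cs.foldl (fun t l => if 'a' ≤ l ∧ l ≤ 'z' then t + ((l.toNat : Int) - 96) else t) 0
    = (cs.map pvVal).sum := by
  have : (fun (t : Int) (l : Char) => if 'a' ≤ l ∧ l ≤ 'z' then t + ((l.toNat : Int) - 96) else t)
      = (fun t l => t + pvVal l) := by
    funext t l; by_cases hl : 'a' ≤ l ∧ l ≤ 'z' <;> simp [pvVal, hl]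
  rw [this, PySem.List.foldl_add]
  ring

-- ===== VERDICT (by name: the statement is the Claim_ definition above) =====
theorem is_odd_string_spec : Claim_equal_is_odd_string := by
  intro letters hdom
  have h : letters.toList.all pvDomChar = true := hdom
  show (if PySem.Int.mod (((PySem.List.pyRange 1 27 1).zip "abcdefghijklmnopqrstuvwxyz".toList).foldl
          (fun s kv => letters.toList.foldl (fun s l => if l = kv.2 then s + kv.1 else s) s) 0) 2 ≠ 0
        then true else false)
      = decide (PySem.Int.mod (letters.toList.foldl
          (fun t l => if 'a' ≤ l ∧ l ≤ 'z' then t + ((l.toNat : Int) - 96) else t) 0) 2 ≠ 0)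
  rw [pv_sum_eq letters.toList h, pv_alt_sum letters.toList]
  simp
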